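-- pv_equiv track=rewrite | github.com/JamesDev51/algorithm | 프로그래머스 (Programmers)/Level_0/옹알이(1).py | solution
-- ===== SOURCE A (Python) =====
-- def solution(babbling):
--     answer = 0
--     words=['aya','ye','woo','ma']
--     for babb in babbling:
--         idx=0
--         while True:
--             flag=False
--             for word in words:
--                 if babb[idx:idx+len(word)]==word:
--                     idx+=len(word)
--                     flag=True
--                     break
--             if not flag:break
--         if idx==len(babb):answer+=1
--     return answer
-- ===== SOURCE B (Python) =====
-- def solution(babbling):
--     def ok(s):
--         if s == '':
--             return True
--         return (s.startswith('aya') and ok(s[3:])) or \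
--                (s.startswith('ye') and ok(s[2:])) or \
--                (s.startswith('woo') and ok(s[3:])) or \
--                (s.startswith('ma') and ok(s[2:]))
--     return sum(1 for b in babbling if ok(b))
-- ===== Notes on version B (the rewrite author's own statement) =====
-- stated objective: simpler
-- what changed: Replaces the index-advancing while-loop state machine (idx/flag/break over slices) with a direct recursive-descent predicate ok(s) that strips one word prefix per call, summed over the list; no indices or flags.
import Mathlib
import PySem

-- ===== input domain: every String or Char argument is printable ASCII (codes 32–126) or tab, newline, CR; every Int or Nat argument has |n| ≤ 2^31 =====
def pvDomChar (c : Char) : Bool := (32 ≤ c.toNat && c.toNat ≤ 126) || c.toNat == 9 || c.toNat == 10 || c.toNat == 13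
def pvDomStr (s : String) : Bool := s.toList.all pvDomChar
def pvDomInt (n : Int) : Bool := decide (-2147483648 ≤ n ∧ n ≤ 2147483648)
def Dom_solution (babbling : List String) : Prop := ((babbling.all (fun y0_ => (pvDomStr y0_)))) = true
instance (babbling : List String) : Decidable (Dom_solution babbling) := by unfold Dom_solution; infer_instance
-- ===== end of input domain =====

-- B replaces A's index-advancing while-loop state machine with a recursive-descent
-- prefix-stripping predicate summed over the list (objective: simpler).


-- ===== PORT A =====
-- inner 'for word in words: … break' — first word whose slice babb[idx:idx+len(word)] matches; returns the advanced idx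
def pvTry (babb : List Char) (idx : Nat) : List String → Option Nat
  | [] => none
  | w :: ws =>
      if PySem.List.slice babb (some (idx : Int)) (some ((idx : Int) + (w.toList.length : Int))) = w.toList
      then some (idx + w.toList.length) else pvTry babb idx ws

-- 'while True: …' — repeat until no word matches; fuel is only a totality guard:
-- each step advances idx by ≥ 2 and never past len(babb), so fuel len(babb)+1 never runs out
def loopA (babb : List Char) (fuel idx : Nat) : Nat :=
  match fuel with
  | 0 => idx
  | fuel + 1 =>
    match pvTry babb idx ["aya", "ye", "woo", "ma"] with
    | some j => loopA babb fuel j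
    | none => idx

def solution (babbling : List String) : Int :=
  babbling.foldl (fun answer babb =>
    let idx := loopA babb.toList (babb.toList.length + 1) 0
    if idx = babb.toList.length then answer + 1 else answer) 0

-- ===== PORT B =====
-- recursive-descent predicate: the string is a concatenation of the four words
def okB (s : List Char) : Bool :=
  if s.isEmpty then true
  else
    (PySem.Chars.startswith s "aya".toList && okB (s.drop 3)) ||
    (PySem.Chars.startswith s "ye".toList && okB (s.drop 2)) ||
    (PySem.Chars.startswith s "woo".toList && okB (s.drop 3)) ||
    (PySem.Chars.startswith s "ma".toList && okB (s.drop 2))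
termination_by s.length
decreasing_by
  all_goals
    rename_i hs
    simp [List.isEmpty_iff] at hs
    have := List.length_pos_iff.mpr hs
    simp [List.length_drop]
    omega

def solution_alt (babbling : List String) : Int :=
  babbling.foldl (fun acc b => acc + if okB b.toList then 1 else 0) 0

-- ===== PRECONDITION & SPEC =====
def Spec_solution (babbling : List String) (out : Int) : Prop := out = solution_alt babbling
instance (babbling : List String) (out : Int) : Decidable (Spec_solution babbling out) := by unfold Spec_solution; infer_instance

-- ===== CLAIM (what is proved, stated in full; the proofs are below) =====
def Claim_equal_solution : Prop := ∀ (babbling : List String), Dom_solution babbling → Spec_solution babbling (solution babbling)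

-- ===== LEMMAS AND PROOFS =====

theorem prefix_head {a b : Char} {w₁ w₂ t : List Char}
    (h₁ : (a :: w₁) <+: t) (h₂ : (b :: w₂) <+: t) : a = b := by
  obtain ⟨u, hu⟩ := h₁
  subst hu
  exact (List.cons_prefix_cons.mp h₂).1.symm

theorem pvTry_eq (s : List Char) (idx : Nat) :
    pvTry s idx ["aya", "ye", "woo", "ma"] =
      if ['a','y','a'] <+: s.drop idx then some (idx + 3)
      else if ['y','e'] <+: s.drop idx then some (idx + 2)
      else if ['w','o','o'] <+: s.drop idx then some (idx + 3)
      else if ['m','a'] <+: s.drop idx then some (idx + 2)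
      else none := by
  have key : ∀ (w : List Char), ((s.drop idx).take w.length = w) ↔ (w <+: s.drop idx) := by
    intro w
    rw [List.prefix_iff_eq_take]
    exact eq_comm
  simp only [pvTry, PySem.List.slice_natCast_add]
  rw [show ("aya".toList.length) = ("aya".toList).length from rfl]
  simp only [key]
  norm_num
  rfl

theorem startswith_true {t w : List Char} (h : w <+: t) :
    PySem.Chars.startswith t w = true := (PySem.Chars.startswith_iff _ _).mpr h

theorem startswith_false {t w : List Char} (h : ¬ w <+: t) :
    PySem.Chars.startswith t w = false := by
  cases hb : PySem.Chars.startswith t w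
  · rfl
  · exact absurd (((PySem.Chars.startswith_iff _ _).mp hb)) h

theorem loopA_eq_okB (s : List Char) :
    ∀ (fuel idx : Nat), idx ≤ s.length → s.length - idx < fuel →
      ((loopA s fuel idx = s.length) ↔ okB (s.drop idx) = true) := by
  intro fuel
  induction fuel with
  | zero => intro idx _ h2; omega
  | succ n ih =>
    intro idx h1 h2
    by_cases hempty : s.drop idx = []
    · have hidx : idx = s.length := by
        have := List.length_drop (l := s) (i := idx)
        rw [hempty] at this
        simp at this
        omega
      have hnone : pvTry s idx ["aya", "ye", "woo", "ma"] = none := by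
        rw [pvTry_eq, hempty]
        simp [List.prefix_nil]
      rw [loopA, hnone]
      simp [hempty, okB, hidx]
    · have hlt : idx < s.length := by
        rcases Nat.lt_or_ge idx s.length with h | h
        · exact h
        · exact absurd (List.drop_eq_nil_of_le h) hempty
      have hne : ¬ (s.drop idx).isEmpty := by simp [List.isEmpty_iff, hempty]
      rw [okB]
      simp only [hne, if_false, Bool.false_eq_true]
      by_cases haya : ['a','y','a'] <+: s.drop idx
      · have h2' : ¬ ['y','e'] <+: s.drop idx := fun h => by
          exact absurd (prefix_head h haya) (by decide)
        have h3' : ¬ ['w','o','o'] <+: s.drop idx := fun h => by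
          exact absurd (prefix_head h haya) (by decide)
        have h4' : ¬ ['m','a'] <+: s.drop idx := fun h => by
          exact absurd (prefix_head h haya) (by decide)
        have hsome : pvTry s idx ["aya", "ye", "woo", "ma"] = some (idx + 3) := by
          rw [pvTry_eq]; simp [haya]
        have hlen : 3 ≤ (s.drop idx).length := by
          have := haya.length_le; simpa using this
        have hbound : idx + 3 ≤ s.length := by
          simp [List.length_drop] at hlen; omega
        rw [loopA, hsome]
        rw [ih (idx + 3) hbound (by omega)]
        rw [show s.drop (idx + 3) = (s.drop idx).drop 3 by rw [List.drop_drop]]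
        simp [startswith_true haya, startswith_false h2', startswith_false h3',
              startswith_false h4']
      · by_cases hye : ['y','e'] <+: s.drop idx
        · have h3' : ¬ ['w','o','o'] <+: s.drop idx := fun h => by
            exact absurd (prefix_head h hye) (by decide)
          have h4' : ¬ ['m','a'] <+: s.drop idx := fun h => by
            exact absurd (prefix_head h hye) (by decide)
          have hsome : pvTry s idx ["aya", "ye", "woo", "ma"] = some (idx + 2) := by
            rw [pvTry_eq]; simp [haya, hye]
          have hlen : 2 ≤ (s.drop idx).length := by
            have := hye.length_le; simpa using this
          have hbound : idx + 2 ≤ s.length := by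
            simp [List.length_drop] at hlen; omega
          rw [loopA, hsome]
          rw [ih (idx + 2) hbound (by omega)]
          rw [show s.drop (idx + 2) = (s.drop idx).drop 2 by rw [List.drop_drop]]
          simp [startswith_true hye, startswith_false haya, startswith_false h3',
                startswith_false h4']
        · by_cases hwoo : ['w','o','o'] <+: s.drop idx
          · have h4' : ¬ ['m','a'] <+: s.drop idx := fun h => by
              exact absurd (prefix_head h hwoo) (by decide)
            have hsome : pvTry s idx ["aya", "ye", "woo", "ma"] = some (idx + 3) := by
              rw [pvTry_eq]; simp [haya, hye, hwoo]
            have hlen : 3 ≤ (s.drop idx).length := by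
              have := hwoo.length_le; simpa using this
            have hbound : idx + 3 ≤ s.length := by
              simp [List.length_drop] at hlen; omega
            rw [loopA, hsome]
            rw [ih (idx + 3) hbound (by omega)]
            rw [show s.drop (idx + 3) = (s.drop idx).drop 3 by rw [List.drop_drop]]
            simp [startswith_true hwoo, startswith_false haya, startswith_false hye,
                  startswith_false h4']
          · by_cases hma : ['m','a'] <+: s.drop idx
            · have hsome : pvTry s idx ["aya", "ye", "woo", "ma"] = some (idx + 2) := by
                rw [pvTry_eq]; simp [haya, hye, hwoo, hma]
              have hlen : 2 ≤ (s.drop idx).length := by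
                have := hma.length_le; simpa using this
              have hbound : idx + 2 ≤ s.length := by
                simp [List.length_drop] at hlen; omega
              rw [loopA, hsome]
              rw [ih (idx + 2) hbound (by omega)]
              rw [show s.drop (idx + 2) = (s.drop idx).drop 2 by rw [List.drop_drop]]
              simp [startswith_true hma, startswith_false haya, startswith_false hye,
                    startswith_false hwoo]
            · have hnone : pvTry s idx ["aya", "ye", "woo", "ma"] = none := by
                rw [pvTry_eq]; simp [haya, hye, hwoo, hma]
              rw [loopA, hnone]
              simp [startswith_false haya, startswith_false hye, startswith_false hwoo,
                    startswith_false hma]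
              omega

theorem per_string (b : String) :
    (if loopA b.toList (b.toList.length + 1) 0 = b.toList.length then (1 : Int) else 0) =
      (if okB b.toList then (1 : Int) else 0) := by
  have key := loopA_eq_okB b.toList (b.toList.length + 1) 0 (by omega) (by omega)
  simp only [List.drop_zero] at key
  by_cases h : okB b.toList = true
  · rw [if_pos (key.mpr h), if_pos h]
  · rw [if_neg (fun hc => h (key.mp hc)), if_neg h]

theorem fold_eq (babbling : List String) :
    ∀ (acc : Int),
      babbling.foldl (fun answer babb =>
        let idx := loopA babb.toList (babb.toList.length + 1) 0
        if idx = babb.toList.length then answer + 1 else answer) acc =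
      babbling.foldl (fun a b => a + if okB b.toList then 1 else 0) acc := by
  induction babbling with
  | nil => intro acc; rfl
  | cons b bs ih =>
    intro acc
    simp only [List.foldl_cons]
    rw [ih]
    congr 1
    have := per_string b
    split_ifs at this ⊢ <;> omega

-- ===== VERDICT (by name: the statement is the Claim_ definition above) =====
theorem solution_spec : Claim_equal_solution := by
  intro babbling _
  unfold Spec_solution solution solution_alt
  exact fold_eq babbling 0
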